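-- pv_equiv track=rewrite | github.com/taka3693/-agent-os | tools/run_agent_os_request.py | simplify_error
-- ===== SOURCE A (Python) =====
-- def simplify_error(error: str | None) -> str:
--     s = (error or "").strip()
--     if not s:
--         return "unknown error"
--
--     prefixes = [
--         "PlanValidationError:",
--         "ValueError:",
--         "RuntimeError:",
--         "FileNotFoundError:",
--         "FileExistsError:",
--     ]
--     for prefix in prefixes:
--         if s.startswith(prefix):
--             s = s[len(prefix):].strip()
--             break
--     return s or "unknown error"
-- ===== SOURCE B (Python) =====
-- _ERROR_NAMES = {
--     "PlanValidationError",
--     "ValueError",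
--     "RuntimeError",
--     "FileNotFoundError",
--     "FileExistsError",
-- }
--
--
-- def simplify_error(error):
--     s = (error or "").strip()
--     if not s:
--         return "unknown error"
--     head, sep, rest = s.partition(":")
--     if sep and head in _ERROR_NAMES:
--         s = rest.strip()
--     return s or "unknown error"
-- ===== Notes on version B (the rewrite author's own statement) =====
-- stated objective: simpler
-- what changed: Replaces the loop over prefix strings with repeated startswith tests by a single partition at the first colon followed by one set-membership test on the head.
import Mathlib
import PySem

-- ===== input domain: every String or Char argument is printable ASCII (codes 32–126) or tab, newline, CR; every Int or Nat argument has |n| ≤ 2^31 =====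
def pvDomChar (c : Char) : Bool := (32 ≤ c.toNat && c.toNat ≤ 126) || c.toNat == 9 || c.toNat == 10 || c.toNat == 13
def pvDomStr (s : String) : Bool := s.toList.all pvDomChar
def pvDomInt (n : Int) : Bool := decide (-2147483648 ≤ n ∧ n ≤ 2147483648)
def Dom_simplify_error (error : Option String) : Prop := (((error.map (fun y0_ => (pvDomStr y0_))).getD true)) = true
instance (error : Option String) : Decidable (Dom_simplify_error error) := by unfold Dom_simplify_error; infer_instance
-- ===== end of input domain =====

-- B replaces A's loop of startswith tests over prefix strings by one partition at the
-- first colon plus a set-membership test on the head (objective: simpler).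

-- ===== PORT A =====
def pvPrefixes : List String :=
  ["PlanValidationError:", "ValueError:", "RuntimeError:", "FileNotFoundError:", "FileExistsError:"]

-- the 'for prefix in prefixes: if s.startswith(prefix): …; break' loop
def pvStripLoop : List String → String → String
  | [], s => s
  | p :: ps, s =>
    if PySem.Str.startswith s p then
      PySem.Str.strip (PySem.Str.slice s (some (PySem.Str.len p)) none)
    else pvStripLoop ps s

def simplify_error (error : Option String) : String :=
  let s := PySem.Str.strip (error.getD "")
  if s = "" then "unknown error"
  else
    let s2 := pvStripLoop pvPrefixes s
    if s2 = "" then "unknown error" else s2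

-- ===== PORT B =====
def pvErrorNames : PySem.Set String :=
  PySem.Set.ofList
    ["PlanValidationError", "ValueError", "RuntimeError", "FileNotFoundError", "FileExistsError"]

-- hand port of s.partition(":") (PySem has no partition): exact — head is everything
-- before the first ':', sep records whether a ':' occurs, rest is everything after it
def pvPartitionColon (s : String) : String × Bool × String :=
  match (s.toList.dropWhile (· ≠ ':')) with
  | [] => (s, false, "")
  | _ :: t => (String.ofList (s.toList.takeWhile (· ≠ ':')), true, String.ofList t)

def simplify_error_alt (error : Option String) : String :=
  let s := PySem.Str.strip (error.getD "")
  if s = "" then "unknown error"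
  else
    let pr := pvPartitionColon s
    let s2 := if pr.2.1 && PySem.Set.contains pvErrorNames pr.1 then PySem.Str.strip pr.2.2 else s
    if s2 = "" then "unknown error" else s2

-- ===== PRECONDITION & SPEC =====
def Spec_simplify_error (error : Option String) (out : String) : Prop := out = simplify_error_alt error
instance (error : Option String) (out : String) : Decidable (Spec_simplify_error error out) := by unfold Spec_simplify_error; infer_instance

-- ===== CLAIM (what is proved, stated in full; the proofs are below) =====
def Claim_equal_simplify_error : Prop := ∀ (error : Option String), Dom_simplify_error error → Spec_simplify_error error (simplify_error error)

-- ===== LEMMAS AND PROOFS =====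

-- names before the first colon are uniquely determined
lemma pv_colon_free_eq {a b u v : List Char} (ha : ':' ∉ a) (hb : ':' ∉ b)
    (h : a ++ ':' :: u = b ++ ':' :: v) : a = b ∧ u = v := by
  induction a generalizing b with
  | nil =>
    cases b with
    | nil => simpa using h
    | cons x b' =>
      simp at h
      exact absurd (h.1 ▸ List.mem_cons_self) hb
  | cons x a' ih =>
    cases b with
    | nil =>
      simp at h
      exact absurd (h.1 ▸ List.mem_cons_self) ha
    | cons y b' =>
      simp at h
      obtain ⟨h1, h2⟩ := h
      have := ih (fun hm => ha (List.mem_cons_of_mem _ hm)) (fun hm => hb (List.mem_cons_of_mem _ hm)) h2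
      exact ⟨by simp [h1, this.1], this.2⟩

lemma pv_startswith_false (s p : String) (hc : ':' ∈ p.toList) (hs : ':' ∉ s.toList) :
    PySem.Str.startswith s p = false := by
  cases hb : PySem.Str.startswith s p
  · rfl
  · exfalso
    have h' : PySem.Chars.startswith s.toList p.toList = true := hb
    exact hs (List.IsPrefix.mem hc ((PySem.Chars.startswith_iff _ _).mp h'))

lemma pv_startswith_colon (s n : String) (hn : ':' ∉ n.toList) {h t : List Char}
    (hs : s.toList = h ++ ':' :: t) (hh : ':' ∉ h) :
    (PySem.Str.startswith s (n ++ ":") = true) ↔ h = n.toList := by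
  have hp : (n ++ ":").toList = n.toList ++ [':'] := by simp
  rw [show PySem.Str.startswith s (n ++ ":") = PySem.Chars.startswith s.toList (n ++ ":").toList from rfl,
    PySem.Chars.startswith_iff, hp, hs]
  constructor
  · rintro ⟨u, hu⟩
    have : n.toList ++ ':' :: u = h ++ ':' :: t := by simpa using hu
    exact (pv_colon_free_eq hn hh this).1.symm
  · rintro rfl
    exact ⟨t, by simp⟩

lemma pv_slice_match (s n : String) {t : List Char} (hs : s.toList = n.toList ++ ':' :: t) :
    PySem.Str.slice s (some (PySem.Str.len (n ++ ":"))) none = String.ofList t := by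
  rw [← String.toList_inj]
  have hlen : PySem.Str.len (n ++ ":") = ((n.toList.length + 1 : ℕ) : ℤ) := by
    simp [PySem.Str.len]
  have hb : (PySem.Str.slice s (some ((n.toList.length + 1 : ℕ) : ℤ)) none).toList
      = PySem.List.slice s.toList (some ((n.toList.length + 1 : ℕ) : ℤ)) none := by
    simp [PySem.Str.slice]
  rw [hlen, hb, PySem.List.slice_from_natCast, hs,
    show n.toList ++ ':' :: t = (n.toList ++ [':']) ++ t by simp]
  rw [List.drop_left' (by simp)]
  simp

-- the loop over '<name>:' prefixes, on a string whose first colon splits it as h ++ ':' :: t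
lemma pv_loop_colon (names : List String) (hn : ∀ m ∈ names, ':' ∉ m.toList)
    (s : String) {h t : List Char} (hs : s.toList = h ++ ':' :: t) (hh : ':' ∉ h) :
    pvStripLoop (names.map (· ++ ":")) s =
      if names.contains (String.ofList h) then PySem.Str.strip (String.ofList t) else s := by
  induction names with
  | nil => simp [pvStripLoop]
  | cons n ns ih =>
    simp only [List.map_cons, pvStripLoop, List.contains_cons]
    by_cases he : h = n.toList
    · have hsw : PySem.Str.startswith s (n ++ ":") = true :=
        (pv_startswith_colon s n (hn n (by simp)) hs hh).mpr he
      have hbeq : (String.ofList h == n) = true := by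
        rw [beq_iff_eq, ← String.toList_inj]
        simpa using he
      rw [hsw, if_pos rfl, hbeq, Bool.true_or, if_pos rfl,
        pv_slice_match s n (by rw [hs, he])]
    · have hsw : PySem.Str.startswith s (n ++ ":") = false := by
        cases hb : PySem.Str.startswith s (n ++ ":")
        · rfl
        · exact absurd ((pv_startswith_colon s n (hn n (by simp)) hs hh).mp hb) he
      have hne : String.ofList h ≠ n := by
        intro hc
        exact he (by simpa using congrArg String.toList hc)
      have hbeq : (String.ofList h == n) = false := beq_eq_false_iff_ne.mpr hne
      rw [hsw]
      simp only [Bool.false_eq_true, if_false]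
      rw [hbeq, Bool.false_or, ih (fun m hm => hn m (List.mem_cons_of_mem _ hm))]

lemma pv_loop_no_colon (names : List String) (s : String) (hs : ':' ∉ s.toList) :
    pvStripLoop (names.map (· ++ ":")) s = s := by
  induction names with
  | nil => simp [pvStripLoop]
  | cons n ns ih =>
    simp only [List.map_cons, pvStripLoop]
    rw [pv_startswith_false s (n ++ ":") (by simp) hs]
    simpa only [Bool.false_eq_true, if_false] using ih

lemma pv_dropWhile_head {l t : List Char} {c : Char}
    (h : l.dropWhile (· ≠ ':') = c :: t) : c = ':' := by
  induction l with
  | nil => simp at h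
  | cons x xs ih =>
    rw [List.dropWhile_cons] at h
    by_cases hx : x = ':'
    · simp [hx] at h
      exact hx ▸ h.1.symm
    · simp [hx] at h
      exact ih (by simpa using h)

lemma pv_core (s : String) :
    pvStripLoop pvPrefixes s =
      (let pr := pvPartitionColon s;
       if pr.2.1 && PySem.Set.contains pvErrorNames pr.1 then PySem.Str.strip pr.2.2 else s) := by
  have hnames : pvPrefixes =
      (["PlanValidationError", "ValueError", "RuntimeError", "FileNotFoundError", "FileExistsError"]
        : List String).map (· ++ ":") := by decide
  have hcf : ∀ m ∈ (["PlanValidationError", "ValueError", "RuntimeError", "FileNotFoundError",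
      "FileExistsError"] : List String), ':' ∉ m.toList := by decide
  unfold pvPartitionColon
  cases hd : s.toList.dropWhile (· ≠ ':') with
  | nil =>
    have hs : ':' ∉ s.toList := by
      intro hc
      have := List.dropWhile_eq_nil_iff.mp hd _ hc
      simp at this
    rw [hnames, pv_loop_no_colon _ s hs]
    simp
  | cons c t =>
    have hc : c = ':' := pv_dropWhile_head hd
    have hs : s.toList = s.toList.takeWhile (· ≠ ':') ++ ':' :: t := by
      conv_lhs => rw [← List.takeWhile_append_dropWhile (p := fun x => x ≠ ':') (l := s.toList)]
      rw [hd, hc]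
    have hh : ':' ∉ s.toList.takeWhile (· ≠ ':') := by
      intro hm
      have := List.mem_takeWhile_imp hm
      simp at this
    rw [hnames, pv_loop_colon _ hcf s hs hh]
    simp only [Bool.true_and]
    rfl

-- ===== VERDICT (by name: the statement is the Claim_ definition above) =====
theorem simplify_error_spec : Claim_equal_simplify_error := by
  intro error _
  unfold Spec_simplify_error simplify_error simplify_error_alt
  simp only [pv_core]
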